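-- pv_equiv track=rewrite | github.com/paige0701/algorithms-and-more | projects/everyone_algorithm/dictionary.py | get_names_appear_more_than_once
-- ===== SOURCE A (Python) =====
-- def get_names_appear_more_than_once(li):
--
--     name_dict = {}
--
--     for i in li:
--         if i not in name_dict:
--             name_dict[i] = 1
--         else:
--             name_dict[i] += 1
--
--     result = set()
--     for i in name_dict:
--         if name_dict[i] > 1:
--             result.add(i)
--
--     return result
-- ===== SOURCE B (Python) =====
-- def get_names_appear_more_than_once(li):
--     return {name for name in li if li.count(name) > 1}
-- ===== Notes on version B (the rewrite author's own statement) =====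
-- stated objective: simpler
-- what changed: Replaces A's two-pass count-dict-then-filter with a single set comprehension that keeps each name whose total count in the list exceeds one.
import Mathlib
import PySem

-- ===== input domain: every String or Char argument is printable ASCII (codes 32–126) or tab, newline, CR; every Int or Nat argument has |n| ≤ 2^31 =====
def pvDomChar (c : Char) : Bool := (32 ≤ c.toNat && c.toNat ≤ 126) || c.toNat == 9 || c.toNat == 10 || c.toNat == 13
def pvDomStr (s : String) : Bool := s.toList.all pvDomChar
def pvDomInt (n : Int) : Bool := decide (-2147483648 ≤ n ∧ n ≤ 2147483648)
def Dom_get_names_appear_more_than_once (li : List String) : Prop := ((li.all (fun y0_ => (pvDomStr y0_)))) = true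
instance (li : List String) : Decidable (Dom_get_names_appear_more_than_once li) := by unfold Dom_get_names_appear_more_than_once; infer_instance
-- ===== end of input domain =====

-- B replaces A's two-pass count-dict-then-filter with a single set comprehension keeping the
-- names whose count in the list exceeds one (simpler, not faster). Result is a Python set
-- (PySem.Set: distinct elements, compared as a finite set).

-- ===== PORT A =====
def get_names_appear_more_than_once (li : List String) : List String :=
  let name_dict : PySem.Dict String Int :=
    li.foldl (fun d i =>
      if !(d.contains i) then d.insert i 1
      else d.modify i 0 (· + 1)) PySem.Dict.empty
  name_dict.keys.foldl (fun result i =>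
    if name_dict.getD i 0 > 1 then PySem.Set.add result i else result) PySem.Set.empty

-- ===== PORT B =====
def get_names_appear_more_than_once_alt (li : List String) : List String :=
  li.foldl (fun s name =>
    if PySem.List.count li name > 1 then PySem.Set.add s name else s) PySem.Set.empty

-- ===== PRECONDITION & SPEC =====
def Spec_get_names_appear_more_than_once (li : List String) (out : List String) : Prop := out = get_names_appear_more_than_once_alt li
instance (li : List String) (out : List String) : Decidable (Spec_get_names_appear_more_than_once li out) := by unfold Spec_get_names_appear_more_than_once; infer_instance

-- ===== CLAIM (what is proved, stated in full; the proofs are below) =====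
def Claim_equal_get_names_appear_more_than_once : Prop := ∀ (li : List String), Dom_get_names_appear_more_than_once li → Spec_get_names_appear_more_than_once li (get_names_appear_more_than_once li)

-- ===== LEMMAS AND PROOFS =====

-- On a key not yet in the dict, A's `name_dict[i] = 1` is the same update as `modify i 0 (+1)`.
lemma insert_one_eq_modify (d : PySem.Dict String Int) (i : String)
    (h : d.contains i = false) : d.insert i 1 = d.modify i 0 (· + 1) := by
  have h' : (d.items.any fun p => p.1 == i) = false := by
    simpa [PySem.Dict.contains] using h
  have hg : d.getD i 0 = 0 := by
    have := (PySem.Dict.get?_eq_none_iff_contains d i).mpr h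
    simp [PySem.Dict.getD, this]
  simp [PySem.Dict.insert, PySem.Dict.modify, hg]

lemma ofList_append_singleton {α : Type} [BEq α] (xs : List α) (x : α) :
    PySem.Set.ofList (xs ++ [x]) = PySem.Set.add (PySem.Set.ofList xs) x := by
  simp [PySem.Set.ofList_eq_foldl, List.foldl_append]

-- set(filter p xs) lists the same elements, in the same first-occurrence order, as filtering set(xs).
lemma ofList_filter {α : Type} [BEq α] [LawfulBEq α] (p : α → Bool) (xs : List α) :
    PySem.Set.ofList (xs.filter p) = (PySem.Set.ofList xs).filter p := by
  induction xs using List.reverseRecOn with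
  | nil => rfl
  | append_singleton xs x ih =>
    rw [List.filter_append, ofList_append_singleton]
    by_cases hp : p x = true
    · have : List.filter p [x] = [x] := by simp [hp]
      rw [this, ofList_append_singleton, ih]
      simp only [PySem.Set.add, PySem.Set.contains, List.contains_eq_mem]
      by_cases h : x ∈ (PySem.Set.ofList xs)
      · simp [h, hp]
      · simp [h, List.filter_append, hp]
    · have hx : p x = false := by simpa using hp
      have : List.filter p [x] = [] := by simp [hx]
      rw [this, List.append_nil, ih]
      simp only [PySem.Set.add, PySem.Set.contains, List.contains_eq_mem]
      by_cases h : x ∈ (PySem.Set.ofList xs)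
      · simp [h]
      · simp [h, List.filter_append, hx]

lemma dict_eq_counter (li : List String) :
    li.foldl (fun d i =>
      if !(d.contains i) then d.insert i 1
      else d.modify i 0 (· + 1)) PySem.Dict.empty = PySem.Dict.counter li := by
  rw [PySem.Dict.counter_eq_foldl]
  apply PySem.List.foldl_congr_mem
  intro d x _
  by_cases h : d.contains x = true
  · simp [h]
  · have h' : d.contains x = false := by simpa using h
    simp [h', insert_one_eq_modify d x h']

-- ===== VERDICT (by name: the statement is the Claim_ definition above) =====
theorem get_names_appear_more_than_once_spec : Claim_equal_get_names_appear_more_than_once := by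
  intro li _
  unfold Spec_get_names_appear_more_than_once
  unfold get_names_appear_more_than_once get_names_appear_more_than_once_alt
  rw [dict_eq_counter]
  simp only [PySem.Dict.keys_counter]
  have hA : List.foldl (fun r i => if (PySem.Dict.counter li).getD i 0 > 1 then PySem.Set.add r i else r)
        PySem.Set.empty (PySem.Set.ofList li)
      = List.foldl (fun r i => if 1 < List.count i li then PySem.Set.add r i else r)
        PySem.Set.empty (PySem.Set.ofList li) := by
    apply PySem.List.foldl_congr_mem
    intro r x _
    have hg : (PySem.Dict.counter li).getD x 0 = (List.count x li : Int) := PySem.Dict.getD_counter li x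
    by_cases h : 1 < List.count x li
    · rw [if_pos (by rw [hg]; exact_mod_cast h), if_pos h]
    · rw [if_neg (by rw [hg]; exact_mod_cast h), if_neg h]
  have hB : List.foldl (fun s name => if PySem.List.count li name > 1 then PySem.Set.add s name else s)
        PySem.Set.empty li
      = List.foldl (fun s name => if 1 < List.count name li then PySem.Set.add s name else s)
        PySem.Set.empty li := by
    apply PySem.List.foldl_congr_mem
    intro s x _
    by_cases h : 1 < List.count x li
    · rw [if_pos (by rw [PySem.List.count_eq]; exact h), if_pos h]
    · rw [if_neg (by rw [PySem.List.count_eq]; exact h), if_neg h]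
  rw [hA, hB,
      PySem.List.foldl_ite_eq_foldl_filter (p := fun i => 1 < List.count i li),
      PySem.List.foldl_ite_eq_foldl_filter (p := fun i => 1 < List.count i li)]
  show List.foldl PySem.Set.add [] _ = List.foldl PySem.Set.add [] _
  rw [← PySem.Set.ofList_eq_foldl, ← PySem.Set.ofList_eq_foldl, ofList_filter,
      PySem.Set.ofList_eq_self_of_nodup _ (PySem.Set.nodup_ofList li), ofList_filter]
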